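-- pv_equiv track=rewrite | github.com/matthewyeung35/Appraisal-automation | appraisal program.py | exterior_comment_gen
-- ===== SOURCE A (Python) =====
-- def exterior_comment_gen(exterior_finish):
--     result = ('')
--     exterior_type_count = 0
--     exterior_type_total = len(exterior_finish)
--     for i in exterior_finish:
--         if i == '0':
--             result += ('brick')
--         elif i == '1':
--             result += ('stone')
--         elif i == '2':
--             result += ('vinyl siding')
--         elif i == '3':
--             result += ('concrete')
--         elif i == '4':
--             result += ('stucco')
--         if exterior_type_count < (exterior_type_total-2):
--             result += (', ')
--         elif exterior_type_count == (exterior_type_total-2):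
--             result += (' and ')
--         exterior_type_count += 1
--     return result
-- ===== SOURCE B (Python) =====
-- def exterior_comment_gen(exterior_finish):
--     # Backward pass: build the sentence back-to-front, prepending each word
--     # with the separator determined by how many words are already placed.
--     words = ('brick', 'stone', 'vinyl siding', 'concrete', 'stucco')
--     acc = ''
--     for k, c in enumerate(reversed(exterior_finish)):
--         w = words[int(c)] if c in ('0', '1', '2', '3', '4') else ''
--         if k == 0:
--             acc = w
--         elif k == 1:
--             acc = w + ' and ' + acc
--         else:
--             acc = w + ', ' + acc
--     return acc
-- ===== Notes on version B (the rewrite author's own statement) =====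
-- stated objective: alternative
-- what changed: B traverses the list in reverse and builds the sentence back-to-front by prepending each word (tuple-indexed by int(code)) with a separator chosen from how many words are already placed, instead of A's forward pass with a count-vs-total separator appended after each word.
import Mathlib
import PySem

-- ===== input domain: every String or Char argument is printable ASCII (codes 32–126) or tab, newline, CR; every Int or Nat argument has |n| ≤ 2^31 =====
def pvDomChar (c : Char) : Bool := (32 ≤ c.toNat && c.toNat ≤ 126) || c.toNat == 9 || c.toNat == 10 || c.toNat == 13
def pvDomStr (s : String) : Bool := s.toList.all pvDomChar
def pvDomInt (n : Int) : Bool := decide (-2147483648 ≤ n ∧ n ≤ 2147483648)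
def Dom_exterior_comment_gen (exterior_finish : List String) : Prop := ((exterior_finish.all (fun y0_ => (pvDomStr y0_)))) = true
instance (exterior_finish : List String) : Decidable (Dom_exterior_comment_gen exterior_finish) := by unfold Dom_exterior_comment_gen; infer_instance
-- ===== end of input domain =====

-- B builds the sentence back-to-front over the reversed list, choosing each separator
-- from how many words are already placed (alternative decomposition; same cost).

-- ===== PORT A =====
-- the for-loop over (result, count), transliterated as structural recursion over the same state
def pvLoopA (exterior_type_total : Int) : List String → String → Int → String
  | [], result, _ => result
  | i :: rest, result, exterior_type_count =>
      let result :=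
        if i == "0" then result ++ "brick"
        else if i == "1" then result ++ "stone"
        else if i == "2" then result ++ "vinyl siding"
        else if i == "3" then result ++ "concrete"
        else if i == "4" then result ++ "stucco"
        else result
      let result :=
        if exterior_type_count < exterior_type_total - 2 then result ++ ", "
        else if exterior_type_count == exterior_type_total - 2 then result ++ " and "
        else result
      pvLoopA exterior_type_total rest result (exterior_type_count + 1)

def exterior_comment_gen (exterior_finish : List String) : String :=
  pvLoopA (exterior_finish.length : Int) exterior_finish "" 0

-- ===== PORT B =====
def pvWords : List String := ["brick", "stone", "vinyl siding", "concrete", "stucco"]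

-- w = words[int(c)] if c in ('0','1','2','3','4') else ''
-- (the tuple index is in range whenever the guard holds, so the getD default is unreachable)
def pvWordB (c : String) : String :=
  if ["0", "1", "2", "3", "4"].contains c then
    (((PySem.Int.ofStr? c).bind (fun n => PySem.List.pyGet? pvWords n)).getD "")
  else ""

-- the for-loop over enumerate(reversed(...)), as structural recursion on the reversed list
def pvLoopB : List String → String → Nat → String
  | [], acc, _ => acc
  | c :: rest, acc, k =>
      let w := pvWordB c
      let acc := if k == 0 then w else if k == 1 then w ++ " and " ++ acc else w ++ ", " ++ acc
      pvLoopB rest acc (k + 1)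

def exterior_comment_gen_alt (exterior_finish : List String) : String :=
  pvLoopB exterior_finish.reverse "" 0

-- ===== PRECONDITION & SPEC =====
def Spec_exterior_comment_gen (exterior_finish : List String) (out : String) : Prop := out = exterior_comment_gen_alt exterior_finish
instance (exterior_finish : List String) (out : String) : Decidable (Spec_exterior_comment_gen exterior_finish out) := by unfold Spec_exterior_comment_gen; infer_instance

-- ===== CLAIM (what is proved, stated in full; the proofs are below) =====
def Claim_equal_exterior_comment_gen : Prop := ∀ (exterior_finish : List String), Dom_exterior_comment_gen exterior_finish → Spec_exterior_comment_gen exterior_finish (exterior_comment_gen exterior_finish)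

-- ===== LEMMAS AND PROOFS =====

theorem pv_str_ext {s t : String} (h : s.toList = t.toList) : s = t := String.toList_inj.mp h

-- the material word chosen for one code
def pvPiece (i : String) : String :=
  if i == "0" then "brick"
  else if i == "1" then "stone"
  else if i == "2" then "vinyl siding"
  else if i == "3" then "concrete"
  else if i == "4" then "stucco"
  else ""

-- separator printed after an element, as a function of how many elements remain
def pvSep (n : Nat) : String := if 2 <= n then ", " else if n = 1 then " and " else ""

-- common characterisation of both results, on the already-translated parts
def pvG : List String -> String
  | [] => ""
  | x :: rest => x ++ pvSep rest.length ++ pvG rest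

def pvF (l : List String) : String := pvG (l.map pvPiece)

theorem pvF_cons (i : String) (rest : List String) :
    pvF (i :: rest) = pvPiece i ++ pvSep rest.length ++ pvF rest := by
  simp [pvF, pvG]

theorem pv_chain (r i : String) :
    (if i == "0" then r ++ "brick"
     else if i == "1" then r ++ "stone"
     else if i == "2" then r ++ "vinyl siding"
     else if i == "3" then r ++ "concrete"
     else if i == "4" then r ++ "stucco"
     else r) = r ++ pvPiece i := by
  unfold pvPiece
  split_ifs <;> (apply pv_str_ext; simp)

theorem pv_loopA_eq (total : Int) (l : List String) (r : String) (c : Int)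
    (h : c + (l.length : Int) = total) : pvLoopA total l r c = r ++ pvF l := by
  induction l generalizing r c with
  | nil => apply pv_str_ext; simp [pvLoopA, pvF, pvG]
  | cons i rest ih =>
    have hl : c + 1 + (rest.length : Int) = total := by
      simp only [List.length_cons] at h; push_cast at h ⊢; omega
    simp only [pvLoopA]
    rw [pv_chain]
    simp only [beq_iff_eq]
    by_cases h1 : c < total - 2
    · have h2 : 2 <= rest.length := by omega
      rw [if_pos h1, ih _ _ (by omega), pvF_cons, pvSep, if_pos h2]
      apply pv_str_ext; simp
    · by_cases h3 : c = total - 2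
      · have h4 : rest.length = 1 := by omega
        rw [if_neg h1, if_pos h3, ih _ _ (by omega), pvF_cons, pvSep,
          if_neg (by omega), if_pos h4]
        apply pv_str_ext; simp
      · have h5 : rest.length = 0 := by omega
        rw [if_neg h1, if_neg h3, ih _ _ (by omega), pvF_cons, pvSep,
          if_neg (by omega), if_neg (by omega)]
        apply pv_str_ext; simp

theorem pv_word (c : String) : pvWordB c = pvPiece c := by
  unfold pvWordB pvPiece
  by_cases h : ["0", "1", "2", "3", "4"].contains c
  · simp only [List.contains_eq_mem, List.mem_cons, List.not_mem_nil, or_false,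
      decide_eq_true_eq] at h
    rcases h with rfl | rfl | rfl | rfl | rfl <;> decide
  · rw [if_neg h]
    simp only [List.contains_eq_mem, List.mem_cons, List.not_mem_nil, or_false,
      decide_eq_true_eq, not_or] at h
    obtain ⟨h0, h1, h2, h3, h4⟩ := h
    simp [h0, h1, h2, h3, h4]

-- B's loop invariant: acc holds the already-built tail pvG t and k counts its words
theorem pv_loopB_eq (m : List String) (t : List String)
    : pvLoopB m (pvG t) t.length = pvG ((m.map pvPiece).reverse ++ t) := by
  induction m generalizing t with
  | nil => simp [pvLoopB]
  | cons c rest ih =>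
    simp only [pvLoopB, pv_word]
    have hstep : (if t.length == 0 then pvPiece c
        else if t.length == 1 then pvPiece c ++ " and " ++ pvG t
        else pvPiece c ++ ", " ++ pvG t) = pvG (pvPiece c :: t) := by
      rw [pvG, pvSep]
      rcases t with _ | ⟨x, _ | ⟨y, t'⟩⟩
      · simp [pvG]
      · simp [pvG]
      · simp
    rw [hstep]
    have := ih (pvPiece c :: t)
    simpa using this

theorem pv_alt_eq (l : List String) : exterior_comment_gen_alt l = pvF l := by
  unfold exterior_comment_gen_alt
  have h := pv_loopB_eq l.reverse []
  simpa [pvF, List.map_reverse] using h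

-- ===== VERDICT (by name: the statement is the Claim_ definition above) =====
theorem exterior_comment_gen_spec : Claim_equal_exterior_comment_gen := by
  intro xs _
  unfold Spec_exterior_comment_gen exterior_comment_gen
  rw [pv_alt_eq, pv_loopA_eq (xs.length : Int) xs "" 0 (by simp)]
  exact (pv_str_ext (by simp)).symm
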